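-- pv_equiv track=rewrite | github.com/devdenneg/chupik | human_behavior.py | split_into_messages
-- ===== SOURCE A (Python) =====
-- def split_into_messages(text: str, max_length: int = 200) -> list:
--     """
--     Разбить длинный текст на несколько сообщений.
--
--     Args:
--         text: Текст для разбиения
--         max_length: Максимальная длина одного сообщения
--
--     Returns:
--         Список сообщений
--     """
--     if len(text) <= max_length:
--         return [text]
--
--     messages = []
--
--     # Сначала пробуем разбить по абзацам
--     paragraphs = text.split('\n\n')
--     current_message = ""
--
--     for paragraph in paragraphs:
--         # Если параграф сам длиннее max_length, разбиваем по предложениям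
--         if len(paragraph) > max_length:
--             sentences = paragraph.replace('! ', '!|').replace('? ', '?|').replace('. ', '.|').split('|')
--
--             for sentence in sentences:
--                 if len(current_message) + len(sentence) + 1 <= max_length:
--                     current_message += (" " if current_message else "") + sentence
--                 else:
--                     if current_message:
--                         messages.append(current_message.strip())
--                     current_message = sentence
--         else:
--             # Проверяем, поместится ли параграф в текущее сообщение
--             if len(current_message) + len(paragraph) + 2 <= max_length:
--                 current_message += ("\n\n" if current_message else "") + paragraph
--             else:
--                 if current_message:
--                     messages.append(current_message.strip())
--                 current_message = paragraph
--
--     # Добавляем последнее сообщение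
--     if current_message:
--         messages.append(current_message.strip())
--
--     return messages if messages else [text]
-- ===== SOURCE B (Python) =====
-- def split_into_messages(text: str, max_length: int = 200) -> list:
--     """Split long text into messages: flatten paragraphs/sentences into
--     (content, separator) items first, then one uniform greedy packing pass."""
--     if len(text) <= max_length:
--         return [text]
--
--     # Pass 1: flat list of (content, separator) items.
--     items = []
--     for paragraph in text.split('\n\n'):
--         if len(paragraph) > max_length:
--             for sentence in paragraph.replace('! ', '!|').replace('? ', '?|').replace('. ', '.|').split('|'):
--                 items.append((sentence, ' '))
--         else:
--             items.append((paragraph, '\n\n'))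
--
--     # Pass 2: uniform greedy packing over the items.
--     messages = []
--     current = ""
--     for content, sep in items:
--         if len(current) + len(content) + len(sep) <= max_length:
--             current += (sep if current else "") + content
--         else:
--             if current:
--                 messages.append(current.strip())
--             current = content
--     if current:
--         messages.append(current.strip())
--
--     return messages if messages else [text]
-- ===== Notes on version B (the rewrite author's own statement) =====
-- stated objective: simpler
-- what changed: Replaces the nested paragraph/sentence loops with two distinct packing branches (overhead 1 with separator ' ', overhead 2 with separator '\n\n') by a first pass that flattens the text into (content, separator) items and a single uniform greedy packing loop whose length check and append both use the item's separator.
import Mathlib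
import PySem

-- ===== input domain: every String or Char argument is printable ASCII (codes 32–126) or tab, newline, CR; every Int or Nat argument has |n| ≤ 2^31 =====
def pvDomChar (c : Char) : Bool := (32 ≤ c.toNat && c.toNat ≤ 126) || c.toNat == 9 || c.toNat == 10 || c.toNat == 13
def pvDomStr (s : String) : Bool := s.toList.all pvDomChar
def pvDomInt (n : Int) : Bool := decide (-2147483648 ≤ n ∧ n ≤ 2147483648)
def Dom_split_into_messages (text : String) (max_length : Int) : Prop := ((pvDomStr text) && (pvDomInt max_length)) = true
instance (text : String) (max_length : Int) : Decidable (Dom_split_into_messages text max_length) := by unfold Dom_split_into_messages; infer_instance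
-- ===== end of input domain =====

-- B flattens A's nested paragraph/sentence loops into one (content, separator) item list
-- packed by a single uniform greedy loop; same return value, different decomposition.


-- ===== PORT A =====
-- s.split(sep) for a nonempty literal sep: split? is always `some` there, getD is a totalizer
def pvSplit (s sep : String) : List String := (PySem.Str.split? s sep).getD [s]

-- paragraph.replace('! ','!|').replace('? ','?|').replace('. ','.|').split('|')
def pvSentences (paragraph : String) : List String :=
  pvSplit (PySem.Str.replace (PySem.Str.replace (PySem.Str.replace paragraph "! " "!|") "? " "?|") ". " ".|") "|"

-- inner `for sentence in sentences` loop body of A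
def pvStepSentA (max_length : Int) (st : List String × String) (sentence : String) : List String × String :=
  if PySem.Str.len st.2 + PySem.Str.len sentence + 1 ≤ max_length then
    (st.1, st.2 ++ (if st.2 ≠ "" then " " else "") ++ sentence)
  else
    ((if st.2 ≠ "" then st.1 ++ [PySem.Str.strip st.2] else st.1), sentence)

-- `for paragraph in paragraphs` loop body of A
def pvStepParaA (max_length : Int) (st : List String × String) (paragraph : String) : List String × String :=
  if PySem.Str.len paragraph > max_length then
    (pvSentences paragraph).foldl (pvStepSentA max_length) st
  else
    if PySem.Str.len st.2 + PySem.Str.len paragraph + 2 ≤ max_length then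
      (st.1, st.2 ++ (if st.2 ≠ "" then "\n\n" else "") ++ paragraph)
    else
      ((if st.2 ≠ "" then st.1 ++ [PySem.Str.strip st.2] else st.1), paragraph)

def split_into_messages (text : String) (max_length : Int) : List String :=
  if PySem.Str.len text ≤ max_length then [text]
  else
    let st := (pvSplit text "\n\n").foldl (pvStepParaA max_length) ([], "")
    let messages := if st.2 ≠ "" then st.1 ++ [PySem.Str.strip st.2] else st.1
    if messages ≠ [] then messages else [text]

-- ===== PORT B =====
-- pass 1: the flat (content, separator) item list
def pvItems (max_length : Int) (paragraphs : List String) : List (String × String) :=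
  paragraphs.flatMap (fun p =>
    if PySem.Str.len p > max_length then (pvSentences p).map (fun s => (s, " "))
    else [(p, "\n\n")])

-- pass 2: the uniform greedy packing step
def pvPack (max_length : Int) (st : List String × String) (item : String × String) : List String × String :=
  if PySem.Str.len st.2 + PySem.Str.len item.1 + PySem.Str.len item.2 ≤ max_length then
    (st.1, st.2 ++ (if st.2 ≠ "" then item.2 else "") ++ item.1)
  else
    ((if st.2 ≠ "" then st.1 ++ [PySem.Str.strip st.2] else st.1), item.1)

def split_into_messages_alt (text : String) (max_length : Int) : List String :=
  if PySem.Str.len text ≤ max_length then [text]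
  else
    let st := (pvItems max_length (pvSplit text "\n\n")).foldl (pvPack max_length) ([], "")
    let messages := if st.2 ≠ "" then st.1 ++ [PySem.Str.strip st.2] else st.1
    if messages ≠ [] then messages else [text]

-- ===== PRECONDITION & SPEC =====
def Spec_split_into_messages (text : String) (max_length : Int) (out : List String) : Prop := out = split_into_messages_alt text max_length
instance (text : String) (max_length : Int) (out : List String) : Decidable (Spec_split_into_messages text max_length out) := by unfold Spec_split_into_messages; infer_instance

-- ===== CLAIM (what is proved, stated in full; the proofs are below) =====
def Claim_equal_split_into_messages : Prop := ∀ (text : String) (max_length : Int), Dom_split_into_messages text max_length → Spec_split_into_messages text max_length (split_into_messages text max_length)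

-- ===== LEMMAS AND PROOFS =====

theorem pvPack_space (ml : Int) (st : List String × String) (s : String) :
    pvPack ml st (s, " ") = pvStepSentA ml st s := by
  simp only [pvPack, pvStepSentA]
  have h : PySem.Str.len " " = 1 := by decide
  rw [h]

theorem pvPack_para (ml : Int) (st : List String × String) (p : String) :
    pvPack ml st (p, "\n\n") = (if PySem.Str.len st.2 + PySem.Str.len p + 2 ≤ ml then
      (st.1, st.2 ++ (if st.2 ≠ "" then "\n\n" else "") ++ p)
    else
      ((if st.2 ≠ "" then st.1 ++ [PySem.Str.strip st.2] else st.1), p)) := by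
  simp only [pvPack]
  have h : PySem.Str.len "\n\n" = 2 := by decide
  rw [h]

theorem foldl_items_eq (ml : Int) (ps : List String) (st : List String × String) :
    (pvItems ml ps).foldl (pvPack ml) st = ps.foldl (pvStepParaA ml) st := by
  induction ps generalizing st with
  | nil => rfl
  | cons p rest ih =>
    simp only [pvItems, List.flatMap_cons, List.foldl_append, List.foldl_cons]
    by_cases hp : PySem.Str.len p > ml
    · simp only [hp, if_pos]
      rw [List.foldl_map]
      simp only [pvPack_space]
      have := ih (((pvSentences p).foldl (pvStepSentA ml) st))
      simp only [pvItems] at this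
      rw [this]
      simp only [pvStepParaA, hp, if_pos]
    · simp only [hp, ite_false, List.foldl_cons, List.foldl_nil]
      have := ih (pvPack ml st (p, "\n\n"))
      simp only [pvItems] at this
      rw [this]
      congr 1
      rw [pvPack_para]
      simp only [pvStepParaA, hp, ite_false]

-- ===== VERDICT (by name: the statement is the Claim_ definition above) =====
theorem split_into_messages_spec : Claim_equal_split_into_messages := by
  intro text max_length _
  unfold Spec_split_into_messages split_into_messages split_into_messages_alt
  rw [foldl_items_eq]
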